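-- pv_equiv track=rewrite | github.com/datawhalechina/huawei-od-python | codes/questions200/040_assemble-new-array.py | dfs
-- ===== SOURCE A (Python) =====
-- def dfs(nums, m, index, min_val, count):
--     if m < 0:
--         return count
--     if m == 0 or m < min_val:
--         return count + 1
--
--     for i in range(index, len(nums)):
--         count = dfs(nums, m - nums[i], i, min_val, count)
--     return count
-- ===== SOURCE B (Python) =====
-- def dfs(nums, m, index, min_val, count):
--     if m < 0:
--         return count
--     if m == 0 or m < min_val:
--         return count + 1
--     n = len(nums)
--     # bottom-up DP: rows[t][i] = number of counted leaves reachable from state (t, i)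
--     rows = []
--     for t in range(m + 1):
--         if t == 0 or t < min_val:
--             row = [1] * (n + 1)
--         else:
--             row = [0]
--             for i in range(n - 1, -1, -1):
--                 s = t - nums[i]
--                 row = [(rows[s][i] if s >= 0 else 0) + row[0]] + row
--         rows.append(row)
--     return count + rows[m][min(index, n)]
-- ===== Notes on version B (the rewrite author's own statement) =====
-- stated objective: alternative
-- what changed: A's accumulator-threaded recursion over all combinations is replaced by a bottom-up dynamic-programming table rows[t][i] (leaves reachable with remaining target t starting at index i), filled once and read off at (m, index).
-- outside the precondition, e.g. on dfs([0], 1, 1, 1, 1): A returns 1, B raises IndexError; on dfs([-3], 5, 2, 1, 0): A returns 0, B raises IndexError; on dfs([2], 2, -1, 1, 0): A returns 2, B returns 0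
import Mathlib
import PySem

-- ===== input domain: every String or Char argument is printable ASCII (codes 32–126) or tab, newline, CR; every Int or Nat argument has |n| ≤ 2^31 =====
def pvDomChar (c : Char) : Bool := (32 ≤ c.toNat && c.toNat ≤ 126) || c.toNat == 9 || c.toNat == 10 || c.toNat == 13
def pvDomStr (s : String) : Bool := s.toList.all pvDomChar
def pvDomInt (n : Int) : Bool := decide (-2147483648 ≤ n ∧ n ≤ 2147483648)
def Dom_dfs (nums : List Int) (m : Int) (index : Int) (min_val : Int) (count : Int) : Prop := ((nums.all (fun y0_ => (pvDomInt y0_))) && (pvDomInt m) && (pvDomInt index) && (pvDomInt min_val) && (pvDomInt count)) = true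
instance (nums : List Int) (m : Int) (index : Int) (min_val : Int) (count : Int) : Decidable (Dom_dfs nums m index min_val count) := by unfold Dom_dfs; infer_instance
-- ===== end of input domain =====

-- B replaces A's accumulator-threaded recursion by a bottom-up DP table over (remaining target, start index); equivalence is about return values.

-- ===== PORT A =====
-- A's recursion made total with fuel; on Pre_ inputs the fuel m.toNat + 1 is
-- never exhausted (each recursive call lowers m by at least 1).
def dfsFuel (nums : List Int) (min_val : Int) : Nat → Int → Int → Int → Int
  | 0, _, _, count => count
  | fuel + 1, m, index, count =>
    if m < 0 then count
    else if m = 0 ∨ m < min_val then count + 1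
    else (PySem.List.pyRange index (nums.length : Int) 1).foldl
      (fun c i => dfsFuel nums min_val fuel (m - PySem.List.pyGetD nums i 0) i c) count

def dfs (nums : List Int) (m : Int) (index : Int) (min_val : Int) (count : Int) : Int :=
  dfsFuel nums min_val (m.toNat + 1) m index count

-- ===== PORT B =====
-- one DP row of Source B: 'row = [1]*(n+1)' or the countdown loop
-- 'row = [(rows[s][i] if s >= 0 else 0) + row[0]] + row' (row is never empty, so
-- pyGetD row 0 0 is exactly Python's row[0])
def rowFor (nums : List Int) (min_val : Int) (rows : List (List Int)) (t : Int) : List Int :=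
  if t = 0 ∨ t < min_val then List.replicate (nums.length + 1) 1
  else (PySem.List.pyRange ((nums.length : Int) - 1) (-1) (-1)).foldl
    (fun row i =>
      ((if 0 ≤ t - PySem.List.pyGetD nums i 0
        then PySem.List.pyGetD (PySem.List.pyGetD rows (t - PySem.List.pyGetD nums i 0) []) i 0
        else 0) + PySem.List.pyGetD row 0 0) :: row)
    [0]

def dfs_alt (nums : List Int) (m : Int) (index : Int) (min_val : Int) (count : Int) : Int :=
  if m < 0 then count
  else if m = 0 ∨ m < min_val then count + 1
  else
    count + PySem.List.pyGetD
      (PySem.List.pyGetD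
        ((PySem.List.pyRange 0 (m + 1) 1).foldl
          (fun rows t => rows ++ [rowFor nums min_val rows t]) [])
        m [])
      (min index (nums.length : Int)) 0

-- ===== PRECONDITION & SPEC =====
-- Once the recursion is entered, Pre_ excludes non-positive elements of nums (they
-- generally make A recurse without bound, RecursionError) and negative index (outside
-- the natural domain: A's value there, when it terminates at all, is an artefact of
-- Python's negative-index wraparound); this also drops the corners where index ≥
-- len(nums) lets A return despite such nums, on which B's table raises IndexError;
-- all base-case inputs are admitted regardless of nums and index.
def Pre_dfs (nums : List Int) (m : Int) (index : Int) (min_val : Int) (count : Int) : Prop :=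
  (m < 0 ∨ m = 0 ∨ m < min_val) ∨ (0 ≤ index ∧ ∀ x ∈ nums, 1 ≤ x)
instance (nums : List Int) (m : Int) (index : Int) (min_val : Int) (count : Int) : Decidable (Pre_dfs nums m index min_val count) := by unfold Pre_dfs; infer_instance

def pvWitness_dfs : List Int × Int × Int × Int × Int := ([1, 2], 3, 0, 1, 0)

def Spec_dfs (nums : List Int) (m : Int) (index : Int) (min_val : Int) (count : Int) (out : Int) : Prop := out = dfs_alt nums m index min_val count
instance (nums : List Int) (m : Int) (index : Int) (min_val : Int) (count : Int) (out : Int) : Decidable (Spec_dfs nums m index min_val count out) := by unfold Spec_dfs; infer_instance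

-- ===== CLAIM (what is proved, stated in full; the proofs are below) =====
def Claim_equal_dfs : Prop := ∀ (nums : List Int) (m : Int) (index : Int) (min_val : Int) (count : Int), Dom_dfs nums m index min_val count → Pre_dfs nums m index min_val count → Spec_dfs nums m index min_val count (dfs nums m index min_val count)

-- ===== LEMMAS AND PROOFS =====

-- pure fueled count of the accepted leaves of A's recursion tree from state (t, i)
def fcnt (nums : List Int) (min_val : Int) : Nat → Int → Int → Int
  | 0, _, _ => 0
  | fuel + 1, t, i =>
    if t < 0 then 0
    else if t = 0 ∨ t < min_val then 1
    else (PySem.List.pyRange i (nums.length : Int) 1).foldl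
      (fun a j => a + fcnt nums min_val fuel (t - PySem.List.pyGetD nums j 0) j) 0

-- A threads an accumulator: dfsFuel = count + fcnt
lemma dfsFuel_eq_add (nums : List Int) (min_val : Int) :
    ∀ (fuel : Nat) (t i c : Int),
      dfsFuel nums min_val fuel t i c = c + fcnt nums min_val fuel t i := by
  intro fuel
  induction fuel with
  | zero => intro t i c; simp [dfsFuel, fcnt]
  | succ k ih =>
    intro t i c
    simp only [dfsFuel, fcnt]
    split_ifs with h1 h2
    · simp
    · rfl
    · have h3 := PySem.List.foldl_congr_mem
        (l := PySem.List.pyRange i (nums.length : Int) 1) (init := c)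
        (f := fun c j => dfsFuel nums min_val k (t - PySem.List.pyGetD nums j 0) j c)
        (g := fun c j => c + fcnt nums min_val k (t - PySem.List.pyGetD nums j 0) j)
        (fun acc x hx => ih _ _ _)
      rw [h3, PySem.List.foldl_add, PySem.List.foldl_add]
      ring

-- fuel irrelevance: with positive nums and 0 ≤ i, any fuel > t.toNat gives the same value
lemma fcnt_fuel (nums : List Int) (min_val : Int) (hpos : ∀ x ∈ nums, 1 ≤ x) :
    ∀ (k1 : Nat) (k2 : Nat) (t i : Int), 0 ≤ i → t.toNat < k1 → t.toNat < k2 →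
      fcnt nums min_val k1 t i = fcnt nums min_val k2 t i := by
  intro k1
  induction k1 with
  | zero => intro k2 t i _ h1 _; omega
  | succ k ih =>
    intro k2 t i hi h1 h2
    obtain ⟨k2', rfl⟩ : ∃ k2', k2 = k2' + 1 := ⟨k2 - 1, by omega⟩
    simp only [fcnt]
    split_ifs with ha hb
    · rfl
    · rfl
    · apply PySem.List.foldl_congr_mem
      intro acc x hx
      rw [PySem.List.mem_pyRange_one] at hx
      have hx0 : (0:Int) ≤ x := le_trans hi hx.1
      have hv : 1 ≤ PySem.List.pyGetD nums x 0 := by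
        rw [PySem.List.pyGetD_eq_getElem nums 0 hx0 hx.2]
        exact hpos _ (List.getElem_mem _)
      have ht : 1 ≤ t := by omega
      congr 1
      exact ih k2' (t - PySem.List.pyGetD nums x 0) x hx0 (by omega) (by omega)

-- canonical (fuel-free) leaf count
def Fc (nums : List Int) (min_val : Int) (t i : Int) : Int :=
  fcnt nums min_val (t.toNat + 1) t i

lemma Fc_neg (nums : List Int) (min_val t i : Int) (h : t < 0) :
    Fc nums min_val t i = 0 := by
  simp [Fc, fcnt, h]

lemma Fc_leaf (nums : List Int) (min_val t i : Int) (h0 : ¬ t < 0) (h : t = 0 ∨ t < min_val) :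
    Fc nums min_val t i = 1 := by
  simp [Fc, fcnt, h0, h]

lemma Fc_out (nums : List Int) (min_val t i : Int) (h0 : ¬ t < 0) (h : ¬ (t = 0 ∨ t < min_val))
    (hi : (nums.length : Int) ≤ i) : Fc nums min_val t i = 0 := by
  simp [Fc, fcnt, h0, h, PySem.List.pyRange_one_eq_nil hi]

lemma Fc_rec (nums : List Int) (min_val t i : Int) (hpos : ∀ x ∈ nums, 1 ≤ x)
    (h0 : ¬ t < 0) (h : ¬ (t = 0 ∨ t < min_val)) (hi : 0 ≤ i) (hin : i < (nums.length : Int)) :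
    Fc nums min_val t i
      = Fc nums min_val (t - PySem.List.pyGetD nums i 0) i + Fc nums min_val t (i + 1) := by
  have hv : 1 ≤ PySem.List.pyGetD nums i 0 := by
    rw [PySem.List.pyGetD_eq_getElem nums 0 hi hin]
    exact hpos _ (List.getElem_mem _)
  have ht1 : 1 ≤ t := by omega
  set v := PySem.List.pyGetD nums i 0 with hvdef
  have hhead : fcnt nums min_val t.toNat (t - v) i = Fc nums min_val (t - v) i := by
    by_cases hneg : t - v < 0
    · obtain ⟨k', hk⟩ : ∃ k', t.toNat = k' + 1 := ⟨t.toNat - 1, by omega⟩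
      rw [Fc_neg nums min_val _ _ hneg, hk]
      simp [fcnt, hneg]
    · exact fcnt_fuel nums min_val hpos t.toNat ((t - v).toNat + 1) (t - v) i hi (by omega) (by omega)
  conv_lhs => rw [Fc]
  rw [show Fc nums min_val t (i + 1) = fcnt nums min_val (t.toNat + 1) t (i + 1) from rfl]
  simp only [fcnt, if_neg h0, if_neg h]
  rw [PySem.List.pyRange_one_cons hin]
  rw [List.foldl_cons, PySem.List.foldl_add, PySem.List.foldl_add, hhead]
  ring

-- one non-leaf row of the DP table is exactly the list of Fc values
lemma rowFor_eq (nums : List Int) (min_val t : Int) (hpos : ∀ x ∈ nums, 1 ≤ x)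
    (h0 : ¬ t < 0) (h : ¬ (t = 0 ∨ t < min_val))
    (hrows : ∀ s : Int, 0 ≤ s → s < t →
      PySem.List.pyGetD ((PySem.List.pyRange 0 t 1).map
        (fun u => (PySem.List.pyRange 0 ((nums.length : Int) + 1) 1).map
          (fun j => Fc nums min_val u j))) s []
        = (PySem.List.pyRange 0 ((nums.length : Int) + 1) 1).map (fun j => Fc nums min_val s j)) :
    rowFor nums min_val ((PySem.List.pyRange 0 t 1).map
        (fun u => (PySem.List.pyRange 0 ((nums.length : Int) + 1) 1).map
          (fun j => Fc nums min_val u j))) t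
      = (PySem.List.pyRange 0 ((nums.length : Int) + 1) 1).map (fun j => Fc nums min_val t j) := by
  rw [rowFor, if_neg h]
  have key : ∀ jn : Nat, jn ≤ nums.length →
      (PySem.List.pyRange ((jn : Int) - 1) (-1) (-1)).foldl
        (fun row i =>
          ((if 0 ≤ t - PySem.List.pyGetD nums i 0
            then PySem.List.pyGetD (PySem.List.pyGetD
              ((PySem.List.pyRange 0 t 1).map
                (fun u => (PySem.List.pyRange 0 ((nums.length : Int) + 1) 1).map
                  (fun j => Fc nums min_val u j)))
              (t - PySem.List.pyGetD nums i 0) []) i 0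
            else 0) + PySem.List.pyGetD row 0 0) :: row)
        ((PySem.List.pyRange (jn : Int) ((nums.length : Int) + 1) 1).map
          (fun j => Fc nums min_val t j))
      = (PySem.List.pyRange 0 ((nums.length : Int) + 1) 1).map (fun j => Fc nums min_val t j) := by
    intro jn
    induction jn with
    | zero =>
      intro _
      rw [show ((0 : Nat) : Int) - 1 = -1 by norm_num,
        PySem.List.pyRange_neg_one_eq_nil (by norm_num)]
      simp
    | succ j ihj =>
      intro hj
      have hjn : (j : Int) < (nums.length : Int) := by exact_mod_cast hj
      rw [show ((j + 1 : Nat) : Int) - 1 = (j : Int) by push_cast; ring,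
        PySem.List.pyRange_neg_one_cons (by omega), List.foldl_cons]
      have hv : 1 ≤ PySem.List.pyGetD nums (j : Int) 0 := by
        rw [PySem.List.pyGetD_eq_getElem nums 0 (by omega) hjn]
        exact hpos _ (List.getElem_mem _)
      have hhead : PySem.List.pyGetD
          ((PySem.List.pyRange ((j:Int)+1) ((nums.length : Int) + 1) 1).map
            (fun x => Fc nums min_val t x)) 0 0 = Fc nums min_val t ((j:Int)+1) := by
        rw [PySem.List.pyRange_one_cons (by omega), List.map_cons, PySem.List.pyGetD_zero_cons]
      have hstep :
          ((if 0 ≤ t - PySem.List.pyGetD nums (j : Int) 0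
            then PySem.List.pyGetD (PySem.List.pyGetD
              ((PySem.List.pyRange 0 t 1).map
                (fun u => (PySem.List.pyRange 0 ((nums.length : Int) + 1) 1).map
                  (fun j => Fc nums min_val u j)))
              (t - PySem.List.pyGetD nums (j : Int) 0) []) (j : Int) 0
            else 0) + PySem.List.pyGetD
              ((PySem.List.pyRange ((j:Int)+1) ((nums.length : Int) + 1) 1).map
                (fun x => Fc nums min_val t x)) 0 0)
          = Fc nums min_val t (j : Int) := by
        rw [hhead]
        by_cases hs : 0 ≤ t - PySem.List.pyGetD nums (j : Int) 0
        · rw [if_pos hs, hrows (t - PySem.List.pyGetD nums (j : Int) 0) hs (by omega),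
            PySem.List.pyGetD_map_pyRange_of_nonneg _ _ _ _ (by omega) (by omega)]
          exact (Fc_rec nums min_val t (j : Int) hpos h0 h (by omega) hjn).symm
        · rw [if_neg hs,
            Fc_rec nums min_val t (j : Int) hpos h0 h (by omega) hjn,
            Fc_neg nums min_val (t - PySem.List.pyGetD nums (j : Int) 0) (j : Int) (by omega)]
      push_cast
      rw [hstep, ← List.map_cons, ← PySem.List.pyRange_one_cons (by omega)]
      have := ihj (by omega)
      push_cast at this
      exact this
  have base : ([0] : List Int)
      = (PySem.List.pyRange ((nums.length : Int)) ((nums.length : Int) + 1) 1).map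
          (fun j => Fc nums min_val t j) := by
    rw [PySem.List.pyRange_one_singleton, List.map_singleton,
      Fc_out nums min_val t _ h0 h (le_refl _)]
  rw [base]
  exact key nums.length (le_refl _)

-- the whole table is the map of Fc rows
lemma rows_eq (nums : List Int) (min_val : Int) (hpos : ∀ x ∈ nums, 1 ≤ x) :
    ∀ K : Nat,
      (PySem.List.pyRange 0 (K : Int) 1).foldl
          (fun rows t => rows ++ [rowFor nums min_val rows t]) []
        = (PySem.List.pyRange 0 (K : Int) 1).map
            (fun u => (PySem.List.pyRange 0 ((nums.length : Int) + 1) 1).map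
              (fun j => Fc nums min_val u j)) := by
  intro K
  induction K with
  | zero => simp [PySem.List.pyRange_one_eq_nil (le_refl (0:Int))]
  | succ K ih =>
    rw [show ((K + 1 : Nat) : Int) = (K : Int) + 1 by push_cast; ring,
      PySem.List.pyRange_one_succ_right (by omega),
      List.foldl_append, List.map_append, ih, List.foldl_cons, List.foldl_nil,
      List.map_singleton]
    congr 1
    have hrow : rowFor nums min_val
        ((PySem.List.pyRange 0 (K : Int) 1).map
          (fun u => (PySem.List.pyRange 0 ((nums.length : Int) + 1) 1).map
            (fun j => Fc nums min_val u j))) (K : Int)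
        = (PySem.List.pyRange 0 ((nums.length : Int) + 1) 1).map
            (fun j => Fc nums min_val (K : Int) j) := by
      by_cases hleaf : (K : Int) = 0 ∨ (K : Int) < min_val
      · rw [rowFor, if_pos hleaf]
        symm
        rw [List.eq_replicate_iff]
        constructor
        · rw [List.length_map, PySem.List.length_pyRange_one]; omega
        · intro b hb
          obtain ⟨j, hj, rfl⟩ := List.mem_map.mp hb
          exact Fc_leaf nums min_val _ _ (by omega) hleaf
      · exact rowFor_eq nums min_val (K : Int) hpos (by omega) hleaf
          (fun s hs0 hsK => PySem.List.pyGetD_map_pyRange_of_nonneg _ _ _ _ hs0 hsK)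
    rw [hrow]

-- ===== VERDICT (by name: the statement is the Claim_ definition above) =====
theorem dfs_spec : Claim_equal_dfs := by
  intro nums m index min_val count _ hpre
  unfold Spec_dfs dfs dfs_alt
  by_cases h1 : m < 0
  · simp [dfsFuel, h1]
  · by_cases h2 : m = 0 ∨ m < min_val
    · simp [dfsFuel, h1, h2]
    · obtain ⟨hidx, hpos⟩ : 0 ≤ index ∧ ∀ x ∈ nums, 1 ≤ x := by
        rcases hpre with h | h
        · exact absurd h (by tauto)
        · exact h
      rw [if_neg h1, if_neg h2, dfsFuel_eq_add,
        show (m + 1) = ((m.toNat + 1 : Nat) : Int) by omega,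
        rows_eq nums min_val hpos (m.toNat + 1),
        PySem.List.pyGetD_map_pyRange_of_nonneg _ _ _ _ (by omega) (by push_cast; omega),
        PySem.List.pyGetD_map_pyRange_of_nonneg _ _ _ _
          (le_min hidx (by omega)) (by omega)]
      congr 1
      by_cases hle : index ≤ (nums.length : Int)
      · rw [min_eq_left hle]; rfl
      · rw [min_eq_right (le_of_not_ge hle)]
        show Fc nums min_val m index = Fc nums min_val m (nums.length : Int)
        rw [Fc_out nums min_val m index h1 h2 (le_of_lt (lt_of_not_ge hle)),
          Fc_out nums min_val m (nums.length : Int) h1 h2 (le_refl _)]
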